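-- pv_equiv track=rewrite | github.com/MetalEinstein/Master-Project | Main Project/mTSB-Centralized/GA_Classes.py | create_fragment
-- ===== SOURCE A (Python) =====
-- def create_fragment(fragment, remainder):
--     # Order the fragments in a nested list for reconstruction
--     sub_list = []
--     fragment_list = []
--     while len(fragment) > 0:
--         if 0 in fragment:
--             sub_list = fragment[0:fragment.index(0)]
--             fragment_list.append(sub_list)
--             del fragment[0:fragment.index(0) + 1]
--         else:
--             fragment_list.append(fragment)
--             fragment = []
--
--     for sub_fragment in remainder:
--         fragment_list.append([sub_fragment])
--     return fragment_list
-- ===== SOURCE B (Python) =====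
-- def create_fragment(fragment, remainder):
--     # One accumulating pass splitting on 0 (A instead rescans with `in`/`index` and deletes the prefix each round).
--     # Note: A empties `fragment` in place; B does not mutate it (return value is identical).
--     fragment_list = []
--     current = []
--     for x in fragment:
--         if x == 0:
--             fragment_list.append(current)
--             current = []
--         else:
--             current.append(x)
--     if current:
--         fragment_list.append(current)
--     fragment_list.extend([r] for r in remainder)
--     return fragment_list
-- ===== Notes on version B (the rewrite author's own statement) =====
-- stated objective: alternative
-- what changed: Replace the while-loop that rescans the remaining list with `in`/`index` and deletes the consumed prefix in place by a single left-to-right pass that accumulates the current segment and flushes it at each 0; B also does not mutate the input list (A empties `fragment` in place), the return value is identical.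
import Mathlib
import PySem

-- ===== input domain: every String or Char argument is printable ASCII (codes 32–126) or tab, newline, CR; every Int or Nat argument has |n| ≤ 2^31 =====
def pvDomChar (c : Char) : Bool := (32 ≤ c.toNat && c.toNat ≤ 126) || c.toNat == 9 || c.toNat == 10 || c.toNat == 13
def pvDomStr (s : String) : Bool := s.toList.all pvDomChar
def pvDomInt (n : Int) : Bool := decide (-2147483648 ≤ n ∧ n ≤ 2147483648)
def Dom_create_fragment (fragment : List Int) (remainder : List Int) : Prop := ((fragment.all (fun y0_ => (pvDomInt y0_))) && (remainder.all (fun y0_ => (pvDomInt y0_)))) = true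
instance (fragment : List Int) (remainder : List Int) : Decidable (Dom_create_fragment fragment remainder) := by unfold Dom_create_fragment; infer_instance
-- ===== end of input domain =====

-- B replaces A's rescan-and-delete while-loop by a single accumulating pass splitting on 0.
-- A empties `fragment` in place (del); B does not mutate — the equivalence proved is about the return value.

-- ===== PORT A =====
-- the while-loop: state is (fragment, fragment_list)
def createFragLoopA (fragment : List Int) (fragment_list : List (List Int)) : List (List Int) :=
  if _h : fragment.length > 0 then
    match hidx : PySem.List.index? fragment 0 with     -- `0 in fragment` / `fragment.index(0)`
    | some i =>
        -- sub_list = fragment[0:i]; append; del fragment[0:i+1]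
        createFragLoopA (PySem.List.slice fragment (some ((i : Int) + 1)) none)
          (fragment_list ++ [PySem.List.slice fragment (some 0) (some (i : Int))])
    | none => fragment_list ++ [fragment]               -- append fragment; fragment = []
  else fragment_list
termination_by fragment.length
decreasing_by
  have hi := PySem.List.getElem_of_index?_eq_some hidx
  obtain ⟨hk, -, -⟩ := hi
  rw [show ((i : Int) + 1) = (((i + 1 : Nat)) : Int) by push_cast; ring,
    PySem.List.slice_from_natCast]
  simp only [List.length_drop]
  omega

def create_fragment (fragment : List Int) (remainder : List Int) : List (List Int) :=
  remainder.foldl (fun fl s => fl ++ [[s]]) (createFragLoopA fragment [])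

-- ===== PORT B =====
-- one pass: state is (fragment_list, current)
def stepB (st : List (List Int) × List Int) (x : Int) : List (List Int) × List Int :=
  if x = 0 then (st.1 ++ [st.2], []) else (st.1, st.2 ++ [x])

def create_fragment_alt (fragment : List Int) (remainder : List Int) : List (List Int) :=
  let p := fragment.foldl stepB ([], [])
  let fl := if p.2 ≠ [] then p.1 ++ [p.2] else p.1
  fl ++ remainder.map (fun r => [r])

-- ===== PRECONDITION & SPEC =====
def Spec_create_fragment (fragment : List Int) (remainder : List Int) (out : List (List Int)) : Prop := out = create_fragment_alt fragment remainder
instance (fragment : List Int) (remainder : List Int) (out : List (List Int)) : Decidable (Spec_create_fragment fragment remainder out) := by unfold Spec_create_fragment; infer_instance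

-- ===== CLAIM (what is proved, stated in full; the proofs are below) =====
def Claim_equal_create_fragment : Prop := ∀ (fragment : List Int) (remainder : List Int), Dom_create_fragment fragment remainder → Spec_create_fragment fragment remainder (create_fragment fragment remainder)

-- ===== LEMMAS AND PROOFS =====

-- finishing B's fold state
def finishB (p : List (List Int) × List Int) : List (List Int) :=
  if p.2 ≠ [] then p.1 ++ [p.2] else p.1

-- no zero in xs: the fold only extends the current segment
theorem foldl_stepB_no_zero (xs : List Int) (o : List (List Int)) (c : List Int)
    (h : (0 : Int) ∉ xs) : xs.foldl stepB (o, c) = (o, c ++ xs) := by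
  induction xs generalizing c with
  | nil => simp
  | cons x xs ih =>
      have hx : x ≠ 0 := fun hx => h (hx ▸ List.mem_cons_self)
      simp only [List.foldl_cons, stepB, if_neg hx]
      rw [ih _ (fun hm => h (List.mem_cons_of_mem _ hm))]
      simp

-- finished segments accumulate on the left
theorem foldl_stepB_shift (xs : List Int) (o : List (List Int)) (c : List Int) :
    xs.foldl stepB (o, c) = (o ++ (xs.foldl stepB ([], c)).1, (xs.foldl stepB ([], c)).2) := by
  induction xs generalizing o c with
  | nil => simp
  | cons x xs ih =>
      by_cases hx : x = 0
      · subst hx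
        simp only [List.foldl_cons]
        rw [show stepB (o, c) 0 = (o ++ [c], []) from by simp [stepB],
          show stepB (([] : List (List Int)), c) 0 = ([c], []) from by simp [stepB]]
        rw [ih (o ++ [c]) [], ih [c] []]
        simp
      · simp only [List.foldl_cons, stepB, if_neg hx]
        exact ih o (c ++ [x])

-- A's while-loop computes finishB of B's fold (strong induction on the length)
theorem loopA_eq_finishB (n : Nat) (xs : List Int) (acc : List (List Int))
    (hn : xs.length ≤ n) :
    createFragLoopA xs acc = acc ++ finishB (xs.foldl stepB ([], [])) := by
  induction n generalizing xs acc with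
  | zero =>
      have hx : xs = [] := List.eq_nil_of_length_eq_zero (Nat.le_zero.mp hn)
      subst hx
      rw [createFragLoopA.eq_def]
      simp [finishB]
  | succ n ih =>
      by_cases hx : xs = []
      · subst hx
        rw [createFragLoopA.eq_def]
        simp [finishB]
      · rw [createFragLoopA.eq_def]
        have hlen : xs.length > 0 := List.length_pos_iff.mpr hx
        simp only [dif_pos hlen]
        cases hidx : PySem.List.index? xs 0 with
        | none =>
            have hnot : (0 : Int) ∉ xs := (PySem.List.index?_eq_none_iff _ _).mp hidx
            rw [foldl_stepB_no_zero xs [] [] hnot]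
            simp [finishB, hx]
        | some i =>
            obtain ⟨pre, suf, hsplit, hlenpre, hnotpre⟩ :=
              (PySem.List.index?_eq_some_iff _ _ _).mp hidx
            -- slices
            have hslice1 : PySem.List.slice xs (some 0) (some (i : Int)) = pre := by
              rw [show ((0 : Int)) = ((0 : Nat) : Int) by simp, PySem.List.slice_natCast]
              rw [hsplit, ← hlenpre]
              simp
            have hslice2 : PySem.List.slice xs (some ((i : Int) + 1)) none = suf := by
              rw [show ((i : Int) + 1) = (((i + 1 : Nat)) : Int) by push_cast; ring,
                PySem.List.slice_from_natCast]
              rw [show xs = (pre ++ [(0 : Int)]) ++ suf by simp [hsplit],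
                show i + 1 = (pre ++ [(0 : Int)]).length by simp [hlenpre],
                List.drop_left]
            show createFragLoopA (PySem.List.slice xs (some ((i : Int) + 1)) none)
                (acc ++ [PySem.List.slice xs (some 0) (some (i : Int))]) =
              acc ++ finishB (xs.foldl stepB ([], []))
            rw [hslice1, hslice2]
            have hsuf : suf.length ≤ n := by
              have := congrArg List.length hsplit
              simp at this
              omega
            rw [ih suf (acc ++ [pre]) hsuf]
            -- fold over the whole xs
            rw [hsplit, List.foldl_append]
            rw [foldl_stepB_no_zero pre [] [] hnotpre]
            simp only [List.foldl_cons]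
            rw [show stepB (([] : List (List Int)), [] ++ pre) 0 = ([pre], []) from by simp [stepB]]
            rw [foldl_stepB_shift suf [pre] []]
            have hfin : finishB ([pre] ++ (suf.foldl stepB ([], [])).1,
                (suf.foldl stepB ([], [])).2) = [pre] ++ finishB (suf.foldl stepB ([], [])) := by
              unfold finishB
              by_cases hc : (suf.foldl stepB ([], [])).2 = [] <;> simp [hc]
            rw [hfin]
            simp

-- ===== VERDICT (by name: the statement is the Claim_ definition above) =====
theorem create_fragment_spec : Claim_equal_create_fragment := by
  intro fragment remainder _
  unfold Spec_create_fragment create_fragment create_fragment_alt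
  rw [PySem.List.foldl_append_singleton_eq_map,
    loopA_eq_finishB fragment.length fragment [] le_rfl]
  simp [finishB]
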